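-- pv_equiv track=rewrite | github.com/Leopardise/Lane_Detection | grassy_curve.py | fit_manual_polynomial
-- ===== SOURCE A (Python) =====
-- def fit_manual_polynomial(contour):
--     contour.sort(key=lambda p: p[0])
--     x_avg = {}
--     for y, x in contour:
--         if y not in x_avg:
--             x_avg[y] = []
--         x_avg[y].append(x)
--     fitted_curve = []
--     for y in sorted(x_avg.keys()):
--         x_mean = sum(x_avg[y]) // len(x_avg[y])
--         fitted_curve.append((y, x_mean))
--     return fitted_curve
-- ===== SOURCE B (Python) =====
-- def fit_manual_polynomial(contour):
--     contour.sort(key=lambda p: p[0])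
--     fitted_curve = []
--     i = 0
--     n = len(contour)
--     while i < n:
--         y = contour[i][0]
--         s = 0
--         j = i
--         while j < n and contour[j][0] == y:
--             s += contour[j][1]
--             j += 1
--         fitted_curve.append((y, s // (j - i)))
--         i = j
--     return fitted_curve
-- ===== Notes on version B (the rewrite author's own statement) =====
-- stated objective: alternative
-- what changed: Replaces the dict-of-lists index plus a second sort of its keys by a single two-pointer scan over the already-sorted contour that averages each run of equal y values in place.
import Mathlib
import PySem

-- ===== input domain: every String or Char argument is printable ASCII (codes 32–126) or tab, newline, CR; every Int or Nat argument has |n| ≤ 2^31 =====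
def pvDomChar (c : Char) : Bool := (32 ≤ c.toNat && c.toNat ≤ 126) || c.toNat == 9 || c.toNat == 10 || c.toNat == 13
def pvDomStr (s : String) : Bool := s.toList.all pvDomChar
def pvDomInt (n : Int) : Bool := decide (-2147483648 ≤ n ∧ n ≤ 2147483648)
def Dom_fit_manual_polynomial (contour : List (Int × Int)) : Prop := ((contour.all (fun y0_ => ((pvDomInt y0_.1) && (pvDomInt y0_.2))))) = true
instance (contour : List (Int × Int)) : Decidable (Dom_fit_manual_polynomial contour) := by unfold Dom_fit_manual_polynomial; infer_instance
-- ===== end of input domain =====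

-- B replaces A's dict-of-lists index and second key sort by one linear scan of the
-- sorted contour (same return value; both A and B sort the argument in place in Python,
-- the equivalence proved here is about the return value).

-- ===== PORT A =====
def fit_manual_polynomial (contour : List (Int × Int)) : List (Int × Int) :=
  let sc := PySem.List.sorted contour (fun p => p.1) false
  let x_avg := sc.foldl (fun d p =>
      let d1 := if d.contains p.1 then d else d.insert p.1 ([] : List Int)
      d1.modify p.1 [] (· ++ [p.2])) PySem.Dict.empty
  (PySem.List.sorted x_avg.keys (fun y => y) false).foldl
    (fun acc y =>
      let xs := x_avg.getD y []
      acc ++ [(y, PySem.Int.floordiv xs.sum (PySem.List.len xs))]) []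

-- ===== PORT B =====
-- inner while loop of Source B: starting after the first run element, sum the rest of the
-- run of fst = y, count it, and return the remainder of the list
def pvRun (y : Int) : List (Int × Int) → Int × Nat × List (Int × Int)
  | [] => (0, 0, [])
  | (y', x) :: t =>
    if y' == y then
      let r := pvRun y t
      (x + r.1, r.2.1 + 1, r.2.2)
    else (0, 0, (y', x) :: t)

theorem pvRun_rest_length_le (y : Int) (t : List (Int × Int)) :
    (pvRun y t).2.2.length ≤ t.length := by
  induction t with
  | nil => simp [pvRun]
  | cons p t ih =>
    obtain ⟨y', x⟩ := p
    by_cases h : y' == y <;> simp [pvRun, h]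
    omega

-- outer while loop of Source B
def pvScan : List (Int × Int) → List (Int × Int)
  | [] => []
  | (y, x) :: t =>
    let r := pvRun y t
    (y, PySem.Int.floordiv (x + r.1) (Int.ofNat (r.2.1 + 1))) :: pvScan r.2.2
termination_by l => l.length
decreasing_by
  have := pvRun_rest_length_le y t
  simp; omega

def fit_manual_polynomial_alt (contour : List (Int × Int)) : List (Int × Int) :=
  pvScan (PySem.List.sorted contour (fun p => p.1) false)

-- ===== PRECONDITION & SPEC =====
def Spec_fit_manual_polynomial (contour : List (Int × Int)) (out : List (Int × Int)) : Prop := out = fit_manual_polynomial_alt contour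
instance (contour : List (Int × Int)) (out : List (Int × Int)) : Decidable (Spec_fit_manual_polynomial contour out) := by unfold Spec_fit_manual_polynomial; infer_instance

-- ===== CLAIM (what is proved, stated in full; the proofs are below) =====
def Claim_equal_fit_manual_polynomial : Prop := ∀ (contour : List (Int × Int)), Dom_fit_manual_polynomial contour → Spec_fit_manual_polynomial contour (fit_manual_polynomial contour)

-- ===== LEMMAS AND PROOFS =====

-- A's loop body equals a plain modify step (the guarded insert of [] is absorbed)
theorem pvStepEq (d : PySem.Dict Int (List Int)) (p : Int × Int) :
    (let d1 := if d.contains p.1 then d else d.insert p.1 ([] : List Int)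
     d1.modify p.1 [] (· ++ [p.2])) = d.modify p.1 [] (· ++ [p.2]) := by
  show (if d.contains p.1 then d else d.insert p.1 ([] : List Int)).modify p.1 [] (· ++ [p.2])
      = d.modify p.1 [] (· ++ [p.2])
  by_cases h : d.contains p.1
  · simp [h]
  · simp only [h]
    show (d.insert p.1 []).insert p.1 (((d.insert p.1 []).getD p.1 []) ++ [p.2])
        = d.insert p.1 ((d.getD p.1 []) ++ [p.2])
    rw [PySem.Dict.getD_insert_self, PySem.Dict.insert_insert_self,
        PySem.Dict.getD_of_not_contains d [] (by simpa using h)]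

theorem pvDedupSublist (xs : List Int) : (PySem.List.dedup xs).Sublist xs := by
  induction xs with
  | nil => simp [PySem.List.dedup]
  | cons x l ih =>
    have h : PySem.List.dedup (x :: l) = x :: PySem.Set.discard (PySem.Set.ofList l) x := by
      simp [PySem.Set.ofList_cons]
    rw [h]
    refine List.Sublist.cons₂ x ?_
    have h2 : (PySem.Set.discard (PySem.Set.ofList l) x).Sublist (PySem.Set.ofList l) := by
      simp [PySem.Set.discard]
    exact h2.trans (by simpa using ih)

theorem pvRun_eq (y : Int) (t : List (Int × Int)) :
    pvRun y t = (((t.takeWhile (fun p => p.1 == y)).map Prod.snd).sum,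
                 (t.takeWhile (fun p => p.1 == y)).length,
                 t.dropWhile (fun p => p.1 == y)) := by
  induction t with
  | nil => simp [pvRun]
  | cons p t ih =>
    obtain ⟨y', x⟩ := p
    by_cases h : y' == y <;> simp [pvRun, h, ih, List.takeWhile, List.dropWhile]

theorem pvFoldAddConst (y : Int) (gf : List Int) (hg : ∀ z ∈ gf, z = y) :
    gf.foldl PySem.Set.add [y] = [y] := by
  induction gf with
  | nil => rfl
  | cons z l ih =>
    have hz : z = y := hg z (by simp)
    subst hz
    have h1 : PySem.Set.add [z] z = [z] := by simp [PySem.Set.add_of_mem]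
    simp only [List.foldl_cons, h1]
    exact ih (fun w hw => hg w (by simp [hw]))

theorem pvDedupConsGroup (y : Int) (gf rf : List Int) (hg : ∀ z ∈ gf, z = y) (hr : y ∉ rf) :
    PySem.List.dedup (y :: (gf ++ rf)) = y :: PySem.List.dedup rf := by
  have h0 : PySem.List.dedup (y :: (gf ++ rf)) = (gf ++ rf).foldl PySem.Set.add [y] := rfl
  rw [h0, List.foldl_append, pvFoldAddConst y gf hg]
  have h2 : rf.foldl PySem.Set.add [y] = PySem.Set.update [y] rf := rfl
  rw [h2, PySem.Set.update_eq_append_filter]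
  have h3 : ∀ z ∈ PySem.Set.ofList rf, (!(PySem.Set.contains [y] z)) = true := by
    intro z hz
    have hz' : z ∈ rf := (PySem.Set.mem_ofList _ _).1 hz
    simp [PySem.Set.contains]
    rintro rfl; exact hr hz'
  rw [List.filter_eq_self.2 h3]
  simp

-- the central induction: on a list sorted by fst, mapping the floor-mean of the
-- filtered x's over the deduped sorted keys is exactly the single grouping scan
theorem pvMain (s : List (Int × Int)) (hs : s.Pairwise (fun a b => a.1 ≤ b.1)) :
    (PySem.List.dedup (s.map Prod.fst)).map
      (fun y =>
        (y, PySem.Int.floordiv ((s.filter (fun p => p.1 == y)).map Prod.snd).sum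
              (PySem.List.len ((s.filter (fun p => p.1 == y)).map Prod.snd)))) = pvScan s := by
  revert hs
  induction s using pvScan.induct with
  | case1 => intro _; simp [pvScan, PySem.List.dedup]
  | case2 y x t r IH =>
    intro hs
    have hrun := pvRun_eq y t
    have htgr : t.takeWhile (fun p => p.1 == y) ++ t.dropWhile (fun p => p.1 == y) = t :=
      List.takeWhile_append_dropWhile
    set g := t.takeWhile (fun p => p.1 == y) with hgdef
    set rest := t.dropWhile (fun p => p.1 == y) with hrestdef
    have hgall : ∀ p ∈ g, p.1 = y := by
      intro p hp
      have := List.mem_takeWhile_imp hp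
      simpa using this
    have hyle : ∀ p ∈ t, y ≤ p.1 := by
      intro p hp
      exact (List.pairwise_cons.1 hs).1 p hp
    have hrestall : ∀ p ∈ rest, y < p.1 := by
      cases hr : rest with
      | nil => intro p hp; simp at hp
      | cons h tail =>
        have hh : ¬(h.1 == y) = true := by
          have := List.head?_dropWhile_not (fun p : Int × Int => p.1 == y) t
          rw [← hrestdef, hr] at this
          simpa using this
        have hhy : y < h.1 := by
          have h1 : y ≤ h.1 := hyle h (by
            have : h ∈ rest := by simp [hr]
            exact (List.dropWhile_sublist _).mem this)
          have h2 : h.1 ≠ y := by simpa using hh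
          omega
        have hrp : rest.Pairwise (fun a b : Int × Int => a.1 ≤ b.1) :=
          (((List.pairwise_cons.1 hs).2).sublist (List.dropWhile_sublist _))
        intro p hp
        rcases List.mem_cons.1 hp with rfl | hp'
        · exact hhy
        · have := (List.pairwise_cons.1 (hr ▸ hrp)).1 p hp'
          omega
    have hynotin : y ∉ rest.map Prod.fst := by
      intro hy
      rcases List.mem_map.1 hy with ⟨p, hp, hpy⟩
      have := hrestall p hp
      omega
    have hmapfst : ((y, x) :: t).map Prod.fst = y :: (g.map Prod.fst ++ rest.map Prod.fst) := by
      rw [← htgr]; simp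
    have hded : PySem.List.dedup (((y, x) :: t).map Prod.fst)
        = y :: PySem.List.dedup (rest.map Prod.fst) := by
      rw [hmapfst]
      refine pvDedupConsGroup y _ _ ?_ hynotin
      intro z hz
      rcases List.mem_map.1 hz with ⟨p, hp, hpz⟩
      rw [← hpz]; exact hgall p hp
    have hfilterg : g.filter (fun p => p.1 == y) = g :=
      List.filter_eq_self.2 (fun p hp => by simp [hgall p hp])
    have hfilterrest : rest.filter (fun p => p.1 == y) = [] :=
      List.filter_eq_nil_iff.2 (fun p hp => by
        have := hrestall p hp; simp; omega)
    have hfilt : (((y, x) :: t).filter (fun p => p.1 == y)) = (y, x) :: g := by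
      rw [← htgr]
      simp [List.filter_append, hfilterg, hfilterrest]
    have hrest_pw : rest.Pairwise (fun a b : Int × Int => a.1 ≤ b.1) :=
      (((List.pairwise_cons.1 hs).2).sublist (List.dropWhile_sublist _))
    have hscan : pvScan ((y, x) :: t)
        = (y, PySem.Int.floordiv (x + ((g.map Prod.snd).sum))
            (Int.ofNat (g.length + 1))) :: pvScan rest := by
      rw [pvScan]
      rw [hrun]
    rw [hded, hscan, List.map_cons]
    congr 1
    · rw [hfilt]
      simp [PySem.List.len_eq]
    · have hr22 : r.2.2 = rest := by show (pvRun y t).2.2 = rest; rw [hrun]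
      simp only [hr22] at IH
      rw [← IH hrest_pw]
      apply List.map_congr_left
      intro y' hy'
      have hy'mem : y' ∈ rest.map Prod.fst := by
        have := (pvDedupSublist (rest.map Prod.fst)).mem hy'
        exact this
      have hy'ne : y' ≠ y := by
        rcases List.mem_map.1 hy'mem with ⟨p, hp, hpy⟩
        have := hrestall p hp
        omega
      have hfilt2 : (((y, x) :: t).filter (fun p => p.1 == y'))
          = rest.filter (fun p => p.1 == y') := by
        rw [← htgr]
        have hgnone : g.filter (fun p => p.1 == y') = [] :=
          List.filter_eq_nil_iff.2 (fun p hp => by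
            have := hgall p hp; simp [this]; omega)
        simp [List.filter_append, hgnone, hy'ne.symm]
      rw [hfilt2]

-- ===== VERDICT (by name: the statement is the Claim_ definition above) =====
theorem fit_manual_polynomial_spec : Claim_equal_fit_manual_polynomial := by
  intro contour _
  show fit_manual_polynomial contour = fit_manual_polynomial_alt contour
  unfold fit_manual_polynomial fit_manual_polynomial_alt
  set sc := PySem.List.sorted contour (fun p => p.1) false with hsc
  have hstep : sc.foldl (fun d p =>
        let d1 := if d.contains p.1 then d else d.insert p.1 ([] : List Int)
        d1.modify p.1 [] (· ++ [p.2])) PySem.Dict.empty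
      = sc.foldl (fun d p => d.modify p.1 [] (· ++ [p.2])) PySem.Dict.empty := by
    apply PySem.List.foldl_congr_mem
    intro d p _
    exact pvStepEq d p
  simp only []
  rw [hstep]
  set d := sc.foldl (fun d p => d.modify p.1 [] (· ++ [p.2])) PySem.Dict.empty with hd
  have hkeys : d.keys = PySem.List.dedup (sc.map Prod.fst) := by
    rw [hd]
    refine Eq.trans (PySem.Dict.keys_foldl_insert_key sc Prod.fst
      (fun d x => (d.getD x.1 []) ++ [x.2]) PySem.Dict.empty) ?_
    simp [PySem.Set.update_nil_left]
  have hpw : (sc.map Prod.fst).Pairwise (fun a b => a ≤ b) := by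
    have := PySem.List.sorted_map_key_pairwise (xs := contour) (key := fun p => p.1)
    simpa [hsc] using this
  have hkpw : d.keys.Pairwise (fun a b => a ≤ b) := by
    rw [hkeys]
    exact hpw.sublist (pvDedupSublist _)
  have hsortk : PySem.List.sorted d.keys (fun y => y) false = d.keys :=
    PySem.List.sorted_eq_self_of_pairwise _ _ hkpw
  rw [PySem.List.foldl_append_singleton_eq_map, hsortk, hkeys]
  rw [List.nil_append]
  have hget : ∀ y : Int, d.getD y [] = (sc.filter (fun p => p.1 == y)).map Prod.snd := by
    intro y
    rw [hd, PySem.Dict.getD_foldl_modify_append]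
    simp
  have hmapeq : (PySem.List.dedup (sc.map Prod.fst)).map
      (fun y => (y, PySem.Int.floordiv (d.getD y []).sum (PySem.List.len (d.getD y []))))
      = (PySem.List.dedup (sc.map Prod.fst)).map
      (fun y =>
        (y, PySem.Int.floordiv ((sc.filter (fun p => p.1 == y)).map Prod.snd).sum
              (PySem.List.len ((sc.filter (fun p => p.1 == y)).map Prod.snd)))) := by
    apply List.map_congr_left
    intro y _
    rw [hget y]
  rw [hmapeq]
  exact pvMain sc (by simpa [hsc] using PySem.List.sorted_pairwise (xs := contour) (key := fun p => p.1))
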